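-- pv_equiv track=rewrite | github.com/aerasmo/programming-practice | solutions/ragbaby-cipher.py | keyed_caesar
-- ===== SOURCE A (Python) =====
-- def keyed_caesar(key: str) -> str:
--     from string import ascii_lowercase
--     if len(key) != len(set(key)):
--         # reduce multiple chars to single char
--         keys = []
--         for c in key:
--             if c not in keys:
--                 keys.append(c)
--         key = "".join(keys)
--
--     key = key + "".join([x for x in ascii_lowercase if x not in key])
--     return key
-- ===== SOURCE B (Python) =====
-- from string import ascii_lowercase
--
--
-- def keyed_caesar(key: str) -> str:
--     # Recursive dedup of key + ascii_lowercase: keep the head, erase all of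
--     # its later occurrences with str.replace, recurse on what remains.
--     def dedup(s: str) -> str:
--         if not s:
--             return ""
--         head = s[0]
--         return head + dedup(s[1:].replace(head, ""))
--     return dedup(key + ascii_lowercase)
-- ===== Notes on version B (the rewrite author's own statement) =====
-- stated objective: alternative
-- what changed: Replaces A's two-phase structure (conditional seen-list dedup loop over the key, then a membership-filtered comprehension over the alphabet) with a structural recursion over key + ascii_lowercase that keeps the head and deletes all its later occurrences via str.replace before recursing, so no seen collection and no per-character membership test exists at all.
import Mathlib
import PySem

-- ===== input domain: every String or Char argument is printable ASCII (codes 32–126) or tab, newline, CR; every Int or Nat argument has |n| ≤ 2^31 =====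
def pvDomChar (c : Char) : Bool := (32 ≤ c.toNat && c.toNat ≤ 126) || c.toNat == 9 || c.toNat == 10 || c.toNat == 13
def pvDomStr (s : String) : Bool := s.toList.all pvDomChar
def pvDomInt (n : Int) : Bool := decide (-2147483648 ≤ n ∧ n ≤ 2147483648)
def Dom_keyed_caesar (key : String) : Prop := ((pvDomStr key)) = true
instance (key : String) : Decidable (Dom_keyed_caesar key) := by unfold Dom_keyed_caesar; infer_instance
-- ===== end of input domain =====

-- B replaces A's seen-list dedup loop + alphabet comprehension with a structural recursion
-- over key + ascii_lowercase that erases each head's later occurrences (alternative decomposition).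

-- ===== PORT A =====
def pvAscii : List Char := "abcdefghijklmnopqrstuvwxyz".toList

def keyed_caesar (key : String) : String :=
  -- if len(key) != len(set(key)): dedup key by the explicit membership loop
  let key1 : List Char :=
    if (PySem.Set.ofList key.toList).length ≠ key.toList.length then
      key.toList.foldl (fun keys c => if keys.contains c then keys else keys ++ [c]) []
    else key.toList
  -- key = key + "".join([x for x in ascii_lowercase if x not in key])
  String.ofList (key1 ++ pvAscii.filter (fun x => !key1.contains x))

-- ===== PORT B =====
-- B's recursive dedup: head of s, then recurse on the tail with every occurrence of
-- head removed (s[1:].replace(head, "") is exactly List.filter (· ≠ head) on the tail).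
def pvDedup : List Char → List Char
  | [] => []
  | c :: cs => c :: pvDedup (cs.filter (fun x => x ≠ c))
termination_by s => s.length
decreasing_by
  simp only [List.length_cons, Nat.lt_succ_iff, List.length_unattach]
  exact le_trans (List.length_filter_le _ _) (le_of_eq List.length_attach)

def keyed_caesar_alt (key : String) : String :=
  String.ofList (pvDedup (key.toList ++ pvAscii))

-- ===== PRECONDITION & SPEC =====
def Spec_keyed_caesar (key : String) (out : String) : Prop := out = keyed_caesar_alt key
instance (key : String) (out : String) : Decidable (Spec_keyed_caesar key out) := by unfold Spec_keyed_caesar; infer_instance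

-- ===== CLAIM (what is proved, stated in full; the proofs are below) =====
def Claim_equal_keyed_caesar : Prop := ∀ (key : String), Dom_keyed_caesar key → Spec_keyed_caesar key (keyed_caesar key)

-- ===== LEMMAS AND PROOFS =====

-- A's hand-written dedup step is exactly PySem.Set.add
theorem astep_eq_add : (fun (keys : List Char) (c : Char) => if keys.contains c then keys else keys ++ [c]) = PySem.Set.add := by
  funext keys c
  simp [PySem.Set.add]

theorem ofList_eq_foldl_add (xs : List Char) : PySem.Set.ofList xs = xs.foldl PySem.Set.add [] := by
  rfl

-- folding Set.add over a duplicate-free list appends exactly the fresh elements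
theorem foldl_add_nodup {ys : List Char} (h : ys.Nodup) :
    ∀ acc : List Char, ys.foldl PySem.Set.add acc = acc ++ ys.filter (fun y => !acc.contains y) := by
  induction ys with
  | nil => intro acc; simp
  | cons y ys ih =>
    intro acc
    obtain ⟨hy, hys⟩ := List.nodup_cons.mp h
    rw [List.foldl_cons, List.filter_cons]
    by_cases hc : y ∈ acc
    · rw [show PySem.Set.add acc y = acc from by simp [PySem.Set.add, hc]]
      rw [ih hys acc]
      simp [hc]
    · rw [show PySem.Set.add acc y = acc ++ [y] from by simp [PySem.Set.add, hc]]
      rw [ih hys (acc ++ [y])]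
      have hf : ys.filter (fun x => !(acc ++ [y]).contains x) = ys.filter (fun x => !acc.contains x) := by
        apply List.filter_congr
        intro x hx
        have hxy : x ≠ y := fun e => hy (e ▸ hx)
        simp [hxy]
      rw [hf]
      simp [hc]

-- folding Set.add from acc produces acc ++ (a sublist of the input)
theorem foldl_add_sublist (xs : List Char) :
    ∀ acc : List Char, ∃ t, t.Sublist xs ∧ xs.foldl PySem.Set.add acc = acc ++ t := by
  induction xs with
  | nil => intro acc; exact ⟨[], by simp, by simp⟩
  | cons x xs ih =>
    intro acc
    by_cases hc : x ∈ acc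
    · obtain ⟨t, hs, he⟩ := ih acc
      refine ⟨t, hs.cons x, ?_⟩
      rw [List.foldl_cons, show PySem.Set.add acc x = acc from by simp [PySem.Set.add, hc]]
      exact he
    · obtain ⟨t, hs, he⟩ := ih (acc ++ [x])
      refine ⟨x :: t, hs.cons₂ x, ?_⟩
      rw [List.foldl_cons, show PySem.Set.add acc x = acc ++ [x] from by simp [PySem.Set.add, hc]]
      rw [he, List.append_assoc]
      rfl

-- if set(key) and key have the same length, the key is already duplicate-free
theorem ofList_eq_self_of_length (xs : List Char)
    (h : (PySem.Set.ofList xs).length = xs.length) : PySem.Set.ofList xs = xs := by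
  obtain ⟨t, hs, he⟩ := foldl_add_sublist xs []
  rw [ofList_eq_foldl_add, he] at h ⊢
  simp only [List.nil_append] at h ⊢
  exact hs.eq_of_length h

theorem ascii_nodup : pvAscii.Nodup := by decide

-- the Set.add fold is B's recursive dedup of the not-yet-seen elements
theorem pvDedup_nil : pvDedup [] = [] := by simp [pvDedup]

theorem pvDedup_cons (c : Char) (cs : List Char) :
    pvDedup (c :: cs) = c :: pvDedup (cs.filter (fun x => x ≠ c)) := by rw [pvDedup.eq_def]

theorem foldl_add_eq_dedup (xs : List Char) :
    ∀ acc : List Char, xs.foldl PySem.Set.add acc = acc ++ pvDedup (xs.filter (fun x => !acc.contains x)) := by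
  induction xs with
  | nil => intro acc; simp [pvDedup_nil]
  | cons x xs ih =>
    intro acc
    rw [List.foldl_cons, List.filter_cons]
    by_cases hc : x ∈ acc
    · rw [show PySem.Set.add acc x = acc from by simp [PySem.Set.add, hc]]
      rw [ih acc]
      simp [hc]
    · rw [show PySem.Set.add acc x = acc ++ [x] from by simp [PySem.Set.add, hc]]
      rw [ih (acc ++ [x])]
      have hf : xs.filter (fun y => !(acc ++ [x]).contains y)
          = (xs.filter (fun y => !acc.contains y)).filter (fun y => y ≠ x) := by
        rw [List.filter_filter]
        apply List.filter_congr
        intro y _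
        by_cases hyx : y = x <;> by_cases hya : y ∈ acc <;> simp [hyx, hya]
      rw [hf]
      simp [hc, pvDedup_cons]

-- A's whole computation equals Set.ofList of the concatenation
theorem keyA_eq_ofList (key : String) :
    keyed_caesar key = String.ofList (PySem.Set.ofList (key.toList ++ pvAscii)) := by
  rw [ofList_eq_foldl_add, List.foldl_append, foldl_add_nodup ascii_nodup, ← ofList_eq_foldl_add]
  simp only [keyed_caesar]
  by_cases h : (PySem.Set.ofList key.toList).length ≠ key.toList.length
  · rw [if_pos h, astep_eq_add, ← ofList_eq_foldl_add]
  · rw [if_neg h]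
    rw [ofList_eq_self_of_length key.toList (not_ne_iff.mp h)]

-- ===== VERDICT (by name: the statement is the Claim_ definition above) =====
theorem keyed_caesar_spec : Claim_equal_keyed_caesar := by
  intro key _
  unfold Spec_keyed_caesar keyed_caesar_alt
  rw [keyA_eq_ofList, ofList_eq_foldl_add, foldl_add_eq_dedup]
  simp
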